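-- pv_equiv track=rewrite | github.com/zzc1991/chinese_new_word_avl | utils.py | get_code_dict
-- ===== SOURCE A (Python) =====
-- from collections import Counter
--
-- def get_code_dict(data):
--     """
--     Build Chinese words into code
--     将中文单词构建成code
--     """
--     word_number = {}
--     number_word = {}
--     word_freq = {}
--     word_list = []
--     for item in data:
--         if len(item) > 0:
--             [word_list.append(word) for word in item]
--     word_dict = Counter(word_list)
--     i = 0
--     for key in word_dict:
--         i = i + 1
--         word_number[key] = i
--         word_freq[i] = word_dict[key]
--         number_word[i] = key
--     return word_number, word_freq, number_word
-- ===== SOURCE B (Python) =====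
-- def get_code_dict(data):
--     """
--     Build Chinese words into code (single pass: ids and frequencies
--     maintained incrementally, no Counter / second phase).
--     """
--     word_number = {}
--     word_freq = {}
--     number_word = {}
--     for item in data:
--         if len(item) > 0:
--             for word in item:
--                 if word in word_number:
--                     word_freq[word_number[word]] += 1
--                 else:
--                     i = len(word_number) + 1
--                     word_number[word] = i
--                     word_freq[i] = 1
--                     number_word[i] = word
--     return word_number, word_freq, number_word
-- ===== Notes on version B (the rewrite author's own statement) =====
-- stated objective: simpler
-- what changed: Replaced the two-phase build (collect all words into a list, run Counter, then enumerate the Counter's keys to assign ids) by a single pass that assigns each new word the id len(word_number)+1 and increments its frequency in place on every later sighting.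
import Mathlib
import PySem

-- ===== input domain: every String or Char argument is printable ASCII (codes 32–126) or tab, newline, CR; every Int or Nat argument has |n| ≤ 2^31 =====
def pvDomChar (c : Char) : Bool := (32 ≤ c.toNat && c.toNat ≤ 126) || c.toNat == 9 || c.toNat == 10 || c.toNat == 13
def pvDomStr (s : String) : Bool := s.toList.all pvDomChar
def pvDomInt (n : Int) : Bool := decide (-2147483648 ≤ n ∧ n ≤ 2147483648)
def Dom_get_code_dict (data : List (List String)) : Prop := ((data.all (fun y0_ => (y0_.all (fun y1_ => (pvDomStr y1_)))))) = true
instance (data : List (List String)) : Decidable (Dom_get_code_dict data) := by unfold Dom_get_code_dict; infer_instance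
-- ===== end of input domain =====

-- B replaces A's two-phase build (word list + Counter, then enumerate the Counter's keys)
-- by a single pass that assigns ids and maintains frequencies incrementally (objective: simpler).

-- ===== PORT A =====
def get_code_dict (data : List (List String)) : (List (String × Int)) × (List (Int × Int)) × (List (Int × String)) :=
  -- word_list = []; for item in data: if len(item) > 0: [word_list.append(word) for word in item]
  let word_list : List String :=
    data.foldl (fun wl item =>
      if item.length > 0 then item.foldl (fun wl word => wl ++ [word]) wl else wl) []
  -- word_dict = Counter(word_list)
  let word_dict : PySem.Dict String Int := PySem.Dict.counter word_list
  -- i = 0; for key in word_dict: i += 1; word_number[key] = i; word_freq[i] = word_dict[key]; number_word[i] = key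
  let st :=
    word_dict.keys.foldl
      (fun (s : Int × PySem.Dict String Int × PySem.Dict Int Int × PySem.Dict Int String) key =>
        let i := s.1 + 1
        (i, s.2.1.insert key i, s.2.2.1.insert i (word_dict.getD key 0), s.2.2.2.insert i key))
      (0, PySem.Dict.empty, PySem.Dict.empty, PySem.Dict.empty)
  (st.2.1.items, st.2.2.1.items, st.2.2.2.items)

-- ===== PORT B =====
-- one word of Source B's inner loop: seen word → bump its frequency; new word → id = len(word_number)+1
def bStep (s : PySem.Dict String Int × PySem.Dict Int Int × PySem.Dict Int String) (word : String) :
    PySem.Dict String Int × PySem.Dict Int Int × PySem.Dict Int String :=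
  match s.1.get? word with
  | some i => (s.1, s.2.1.insert i (s.2.1.getD i 0 + 1), s.2.2)
  | none =>
    let i : Int := (s.1.size : Int) + 1
    (s.1.insert word i, s.2.1.insert i 1, s.2.2.insert i word)

def get_code_dict_alt (data : List (List String)) : (List (String × Int)) × (List (Int × Int)) × (List (Int × String)) :=
  let st := data.foldl (fun s item => if item.length > 0 then item.foldl bStep s else s)
    (PySem.Dict.empty, PySem.Dict.empty, PySem.Dict.empty)
  (st.1.items, st.2.1.items, st.2.2.items)

-- ===== PRECONDITION & SPEC =====
def Spec_get_code_dict (data : List (List String)) (out : (List (String × Int)) × (List (Int × Int)) × (List (Int × String))) : Prop := out = get_code_dict_alt data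
instance (data : List (List String)) (out : (List (String × Int)) × (List (Int × Int)) × (List (Int × String))) : Decidable (Spec_get_code_dict data out) := by unfold Spec_get_code_dict; infer_instance

-- ===== CLAIM (what is proved, stated in full; the proofs are below) =====
def Claim_equal_get_code_dict : Prop := ∀ (data : List (List String)), Dom_get_code_dict data → Spec_get_code_dict data (get_code_dict data)

-- ===== LEMMAS AND PROOFS =====

-- canonical shapes of the three result dicts over the first-seen-order key list L
def enum1 (i0 : Int) : List String → List (String × Int)
  | [] => []
  | k :: L => (k, i0 + 1) :: enum1 (i0 + 1) L

def freq1 (f : String → Int) (i0 : Int) : List String → List (Int × Int)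
  | [] => []
  | k :: L => (i0 + 1, f k) :: freq1 f (i0 + 1) L

def nw1 (i0 : Int) : List String → List (Int × String)
  | [] => []
  | k :: L => (i0 + 1, k) :: nw1 (i0 + 1) L

lemma enum1_append (w : String) : ∀ (L : List String) (i0 : Int),
    enum1 i0 (L ++ [w]) = enum1 i0 L ++ [(w, i0 + L.length + 1)] := by
  intro L
  induction L with
  | nil => intro i0; simp [enum1]
  | cons k L ih => intro i0; simp [enum1, ih, add_assoc]; ring_nf

lemma freq1_append (f : String → Int) (w : String) : ∀ (L : List String) (i0 : Int),
    freq1 f i0 (L ++ [w]) = freq1 f i0 L ++ [(i0 + L.length + 1, f w)] := by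
  intro L
  induction L with
  | nil => intro i0; simp [freq1]
  | cons k L ih => intro i0; simp [freq1, ih]; ring_nf

lemma nw1_append (w : String) : ∀ (L : List String) (i0 : Int),
    nw1 i0 (L ++ [w]) = nw1 i0 L ++ [(i0 + L.length + 1, w)] := by
  intro L
  induction L with
  | nil => intro i0; simp [nw1]
  | cons k L ih => intro i0; simp [nw1, ih]; ring_nf

lemma freq1_congr {f g : String → Int} : ∀ (L : List String) (i0 : Int),
    (∀ k ∈ L, f k = g k) → freq1 f i0 L = freq1 g i0 L := by
  intro L
  induction L with
  | nil => intro i0 _; rfl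
  | cons k L ih =>
    intro i0 h
    simp only [freq1]
    refine congrArg₂ _ (by rw [h k (by simp)]) (ih _ (fun x hx => h x (by simp [hx])))

lemma freq1_bounds (f : String → Int) : ∀ (L : List String) (i0 : Int) (p : Int × Int),
    p ∈ freq1 f i0 L → i0 < p.1 ∧ p.1 ≤ i0 + L.length := by
  intro L
  induction L with
  | nil => intro i0 p h; simp [freq1] at h
  | cons k L ih =>
    intro i0 p h
    simp only [freq1, List.mem_cons] at h
    rcases h with h | h
    · subst h; simp
    · have := ih (i0 + 1) p h
      simp; omega

lemma nw1_bounds : ∀ (L : List String) (i0 : Int) (p : Int × String),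
    p ∈ nw1 i0 L → i0 < p.1 ∧ p.1 ≤ i0 + L.length := by
  intro L
  induction L with
  | nil => intro i0 p h; simp [nw1] at h
  | cons k L ih =>
    intro i0 p h
    simp only [nw1, List.mem_cons] at h
    rcases h with h | h
    · subst h; simp
    · have := ih (i0 + 1) p h
      simp; omega

lemma enum1_map_fst : ∀ (L : List String) (i0 : Int), (enum1 i0 L).map Prod.fst = L := by
  intro L
  induction L with
  | nil => intro i0; rfl
  | cons k L ih => intro i0; simp [enum1, ih]

lemma enum1_length : ∀ (L : List String) (i0 : Int), (enum1 i0 L).length = L.length := by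
  intro L
  induction L with
  | nil => intro i0; rfl
  | cons k L ih => intro i0; simp [enum1, ih]

lemma enum1_get?_none (w : String) : ∀ (L : List String) (i0 : Int), w ∉ L →
    (PySem.Dict.mk (enum1 i0 L)).get? w = none := by
  intro L i0 hw
  rw [PySem.Dict.get?_eq_none_iff_not_mem_keys]
  rw [PySem.Dict.keys_mk, enum1_map_fst]
  exact hw

-- the seen-word case: lookup of w in enum1, lookup of its id in freq1, and the in-place overwrite
lemma enum_freq_update (f : String → Int) (w : String) : ∀ (L : List String) (i0 : Int),
    L.Nodup → w ∈ L →
    ∃ i : Int, i0 < i ∧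
      (PySem.Dict.mk (enum1 i0 L)).get? w = some i ∧
      (PySem.Dict.mk (freq1 f i0 L)).get? i = some (f w) ∧
      (freq1 f i0 L).map (fun p => if p.1 == i then (i, f w + 1) else p)
        = freq1 (fun k => if k = w then f k + 1 else f k) i0 L := by
  intro L
  induction L with
  | nil => intro i0 _ hw; simp at hw
  | cons k L ih =>
    intro i0 hnd hw
    rcases List.mem_cons.mp hw with rfl | hwL
    · -- head is w
      have hwL : w ∉ L := (List.nodup_cons.mp hnd).1
      refine ⟨i0 + 1, by omega, ?_, ?_, ?_⟩
      · simp [enum1, PySem.Dict.get?_mk_cons]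
      · simp [freq1, PySem.Dict.get?_mk_cons]
      · simp only [freq1, List.map_cons, beq_self_eq_true, if_pos]
        refine congrArg₂ _ (by simp) ?_
        have htail : (freq1 f (i0 + 1) L).map (fun p => if p.1 == i0 + 1 then (i0 + 1, f w + 1) else p)
            = freq1 f (i0 + 1) L := by
          conv_rhs => rw [← List.map_id (freq1 f (i0 + 1) L)]
          refine List.map_congr_left (fun p hp => ?_)
          have := freq1_bounds f L (i0 + 1) p hp
          have : p.1 ≠ i0 + 1 := by omega
          simp [this]
        rw [htail]
        exact (freq1_congr L (i0 + 1) (fun x hx => by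
          have : x ≠ w := fun h => hwL (h ▸ hx)
          simp [this])).symm
    · -- w in the tail
      have hk : k ≠ w := fun h => (List.nodup_cons.mp hnd).1 (h ▸ hwL)
      obtain ⟨i, hi, hg, hf, hm⟩ := ih (i0 + 1) (List.nodup_cons.mp hnd).2 hwL
      refine ⟨i, by omega, ?_, ?_, ?_⟩
      · simpa [enum1, PySem.Dict.get?_mk_cons, hk] using hg
      · have : i0 + 1 ≠ i := by omega
        simpa [freq1, PySem.Dict.get?_mk_cons, this] using hf
      · have hne : i0 + 1 ≠ i := by omega
        simp only [freq1, List.map_cons, hne, beq_iff_eq, if_false]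
        simp only [beq_iff_eq] at hm
        refine congrArg₂ _ (by simp [hk]) hm

-- B's fold over the flattened word stream builds exactly the canonical dicts
lemma B_inv : ∀ ws : List String,
    ws.foldl bStep (PySem.Dict.empty, PySem.Dict.empty, PySem.Dict.empty) =
      (PySem.Dict.mk (enum1 0 (PySem.Set.ofList ws)),
       PySem.Dict.mk (freq1 (fun k => (List.count k ws : Int)) 0 (PySem.Set.ofList ws)),
       PySem.Dict.mk (nw1 0 (PySem.Set.ofList ws))) := by
  intro ws
  induction ws using List.reverseRecOn with
  | nil => rfl
  | append_singleton ws w ih =>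
    rw [List.foldl_append, ih]
    by_cases hw : w ∈ ws
    · -- seen word: key set unchanged, frequency bumped in place
      have hset : PySem.Set.ofList (ws ++ [w]) = PySem.Set.ofList ws := by
        simp only [PySem.Set.ofList_append, PySem.Set.update_cons, PySem.Set.update_nil]
        simp [PySem.Set.add, PySem.Set.mem_ofList, hw]
      obtain ⟨i, hi, hg, hf, hm⟩ := enum_freq_update (fun k => (List.count k ws : Int)) w
        (PySem.Set.ofList ws) 0 (PySem.Set.nodup_ofList ws) ((PySem.Set.mem_ofList ws w).mpr hw)
      simp only [List.foldl_cons, List.foldl_nil, bStep, hg]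
      have hcont : (PySem.Dict.mk (freq1 (fun k => (List.count k ws : Int)) 0 (PySem.Set.ofList ws))).contains i = true := by
        rw [PySem.Dict.contains_eq_isSome_get?, hf]; rfl
      have hgetD : (PySem.Dict.mk (freq1 (fun k => (List.count k ws : Int)) 0 (PySem.Set.ofList ws))).getD i 0
          = (List.count w ws : Int) := PySem.Dict.getD_of_get?_eq_some _ 0 hf
      rw [hset]
      refine congrArg₂ _ rfl (congrArg₂ _ ?_ rfl)
      apply PySem.Dict.ext
      rw [PySem.Dict.items_insert_of_contains _ _ hcont, hgetD]
      show (freq1 _ 0 _).map _ = _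
      rw [hm]
      refine freq1_congr _ 0 (fun x hx => ?_)
      by_cases hxw : x = w
      · subst hxw; simp [List.count_append]
      · simp [List.count_append, List.count_eq_zero, hxw]
    · -- new word: all three dicts get a fresh entry appended
      have hset : PySem.Set.ofList (ws ++ [w]) = PySem.Set.ofList ws ++ [w] := by
        simp only [PySem.Set.ofList_append, PySem.Set.update_cons, PySem.Set.update_nil]
        simp [PySem.Set.add, PySem.Set.mem_ofList, hw]
      set L := PySem.Set.ofList ws with hL
      have hg : (PySem.Dict.mk (enum1 0 L)).get? w = none :=
        enum1_get?_none w L 0 (fun h => hw ((PySem.Set.mem_ofList ws w).mp h))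
      simp only [List.foldl_cons, List.foldl_nil, bStep, hg]
      have hsize : (PySem.Dict.mk (enum1 0 L)).size = L.length := by
        simp only [PySem.Dict.size]; exact enum1_length L 0
      have hc1 : (PySem.Dict.mk (enum1 0 L)).contains w = false := by
        rw [PySem.Dict.contains_eq_isSome_get?, hg]; rfl
      have hc2 : (PySem.Dict.mk (freq1 (fun k => (List.count k ws : Int)) 0 L)).contains ((L.length : Int) + 1) = false := by
        rw [PySem.Dict.contains_eq_decide_mem_keys, PySem.Dict.keys_mk]
        simp only [decide_eq_false_iff_not, List.mem_map]
        rintro ⟨p, hp, hp1⟩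
        have := freq1_bounds _ _ 0 p hp
        omega
      have hc3 : (PySem.Dict.mk (nw1 0 L)).contains ((L.length : Int) + 1) = false := by
        rw [PySem.Dict.contains_eq_decide_mem_keys, PySem.Dict.keys_mk]
        simp only [decide_eq_false_iff_not, List.mem_map]
        rintro ⟨p, hp, hp1⟩
        have := nw1_bounds _ 0 p hp
        omega
      rw [hset]
      refine congrArg₂ _ ?_ (congrArg₂ _ ?_ ?_)
      · apply PySem.Dict.ext
        rw [hsize, PySem.Dict.items_insert_of_not_contains _ _ hc1]
        show enum1 0 L ++ [(w, (L.length : Int) + 1)] = enum1 0 (L ++ [w])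
        rw [enum1_append w L 0]; norm_num
      · apply PySem.Dict.ext
        rw [hsize, PySem.Dict.items_insert_of_not_contains _ _ hc2]
        show freq1 _ 0 L ++ [((L.length : Int) + 1, 1)] = freq1 (fun k => (List.count k (ws ++ [w]) : Int)) 0 (L ++ [w])
        rw [freq1_append _ w L 0]
        rw [freq1_congr (g := fun k => (List.count k (ws ++ [w]) : Int)) L 0 (fun x hx => by
          have hxw : x ≠ w := fun h => hw (h ▸ (PySem.Set.mem_ofList ws x).mp hx)
          simp [List.count_append, List.count_eq_zero, hxw])]
        have hwcnt : (List.count w (ws ++ [w]) : Int) = 1 := by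
          have : List.count w ws = 0 := List.count_eq_zero.mpr hw
          simp [List.count_append, this]
        rw [← hwcnt]; norm_num
      · apply PySem.Dict.ext
        rw [hsize, PySem.Dict.items_insert_of_not_contains _ _ hc3]
        show nw1 0 L ++ [((L.length : Int) + 1, w)] = nw1 0 (L ++ [w])
        rw [nw1_append w L 0]; norm_num

-- A's enumeration loop over fresh distinct keys appends the canonical entries
lemma A_loop (wd_f : String → Int) : ∀ (L : List String) (i0 : Int) (d1 : PySem.Dict String Int)
    (d2 : PySem.Dict Int Int) (d3 : PySem.Dict Int String),
    L.Nodup → (∀ k ∈ L, d1.contains k = false) →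
    (∀ j : Int, i0 < j → d2.contains j = false) → (∀ j : Int, i0 < j → d3.contains j = false) →
    L.foldl (fun (s : Int × PySem.Dict String Int × PySem.Dict Int Int × PySem.Dict Int String) key =>
        let i := s.1 + 1
        (i, s.2.1.insert key i, s.2.2.1.insert i (wd_f key), s.2.2.2.insert i key)) (i0, d1, d2, d3)
      = (i0 + L.length,
         PySem.Dict.mk (d1.items ++ enum1 i0 L),
         PySem.Dict.mk (d2.items ++ freq1 wd_f i0 L),
         PySem.Dict.mk (d3.items ++ nw1 i0 L)) := by
  intro L
  induction L with
  | nil =>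
    intro i0 d1 d2 d3 _ _ _ _
    simp [enum1, freq1, nw1]
  | cons k L ih =>
    intro i0 d1 d2 d3 hnd h1 h2 h3
    simp only [List.foldl_cons]
    have hk : d1.contains k = false := h1 k (by simp)
    rw [ih (i0 + 1) (d1.insert k (i0 + 1)) (d2.insert (i0 + 1) (wd_f k)) (d3.insert (i0 + 1) k)
      (List.nodup_cons.mp hnd).2
      (fun x hx => by
        have hxk : x ≠ k := fun h => (List.nodup_cons.mp hnd).1 (h ▸ hx)
        rw [PySem.Dict.contains_insert]
        simp [hxk, h1 x (by simp [hx])])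
      (fun j hj => by
        rw [PySem.Dict.contains_insert]
        have : j ≠ i0 + 1 := by omega
        simp [this, h2 j (by omega)])
      (fun j hj => by
        rw [PySem.Dict.contains_insert]
        have : j ≠ i0 + 1 := by omega
        simp [this, h3 j (by omega)])]
    rw [PySem.Dict.items_insert_of_not_contains _ _ hk,
        PySem.Dict.items_insert_of_not_contains _ _ (h2 _ (by omega)),
        PySem.Dict.items_insert_of_not_contains _ _ (h3 _ (by omega))]
    simp only [enum1, freq1, nw1, List.append_assoc, List.singleton_append, List.length_cons]
    refine congrArg₂ _ (by push_cast; ring) rfl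

-- the word-list loop of A is a flatten (the len(item)>0 guard only skips empty items)
lemma wl_flatten : ∀ (data : List (List String)) (acc : List String),
    data.foldl (fun wl item =>
      if item.length > 0 then item.foldl (fun wl word => wl ++ [word]) wl else wl) acc
    = acc ++ data.flatten := by
  intro data
  induction data with
  | nil => intro acc; simp
  | cons item data ih =>
    intro acc
    simp only [List.foldl_cons, List.flatten_cons]
    rcases item with _ | ⟨x, xs⟩
    · rw [List.nil_append]; exact ih acc
    · rw [if_pos (by simp), PySem.List.foldl_append_singleton, ih, List.append_assoc]

-- B's guarded nested loop is the fold of bStep over the flattened word stream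
lemma B_guard (data : List (List String))
    (s : PySem.Dict String Int × PySem.Dict Int Int × PySem.Dict Int String) :
    data.foldl (fun s item => if item.length > 0 then item.foldl bStep s else s) s
    = data.flatten.foldl bStep s := by
  rw [List.foldl_flatten]
  induction data generalizing s with
  | nil => rfl
  | cons item data ih =>
    simp only [List.foldl_cons]
    rcases item with _ | ⟨x, xs⟩
    · simp [ih]
    · rw [if_pos (by simp)]; exact ih _

-- ===== VERDICT (by name: the statement is the Claim_ definition above) =====
theorem get_code_dict_spec : Claim_equal_get_code_dict := by
  intro data _
  unfold Spec_get_code_dict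
  simp only [get_code_dict, get_code_dict_alt]
  rw [wl_flatten data [], List.nil_append, B_guard, B_inv]
  rw [PySem.Dict.keys_counter]
  have hf : (fun key => (PySem.Dict.counter data.flatten).getD key 0)
      = fun k => (List.count k data.flatten : Int) := by
    funext k; exact PySem.Dict.getD_counter data.flatten k
  rw [A_loop (fun key => (PySem.Dict.counter data.flatten).getD key 0)
    (PySem.Set.ofList data.flatten) 0 PySem.Dict.empty PySem.Dict.empty PySem.Dict.empty
    (PySem.Set.nodup_ofList data.flatten)
    (fun k _ => PySem.Dict.contains_empty k) (fun j _ => PySem.Dict.contains_empty j)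
    (fun j _ => PySem.Dict.contains_empty j)]
  simp only [hf]
  rfl
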